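-- pv_equiv track=rewrite | github.com/SINHOLEE/Algorithm | 요기요 코테/2.py | solution
-- ===== SOURCE A (Python) =====
-- def solution(message, K):
--     # write your code in Python 3.6
--     res = ''
--     temp = ''
--     cnt = 0
--     for i in range(len(message)):
--         cnt += 1
--         temp += message[i]
--         if cnt <= K:
--             if i == len(message) - 1 or message[i+1] == ' ' :
--                 res += temp
--                 temp = ''
--         else:
--             break
--
--     return res
-- ===== SOURCE B (Python) =====
-- def solution(message, K):
--     k = max(K, 0)
--     s = message[:k]
--     if len(message) > k and message[k] != ' ':
--         idx = s.rfind(' ')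
--         s = s[:idx] if idx != -1 else ''
--     return s
-- ===== Notes on version B (the rewrite author's own statement) =====
-- stated objective: simpler
-- what changed: Replaces the char-by-char accumulator loop (res/temp/cnt with a break) by direct slicing: take the K-character prefix and, if it cuts a word, trim back to the last space via rfind.
import Mathlib
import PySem

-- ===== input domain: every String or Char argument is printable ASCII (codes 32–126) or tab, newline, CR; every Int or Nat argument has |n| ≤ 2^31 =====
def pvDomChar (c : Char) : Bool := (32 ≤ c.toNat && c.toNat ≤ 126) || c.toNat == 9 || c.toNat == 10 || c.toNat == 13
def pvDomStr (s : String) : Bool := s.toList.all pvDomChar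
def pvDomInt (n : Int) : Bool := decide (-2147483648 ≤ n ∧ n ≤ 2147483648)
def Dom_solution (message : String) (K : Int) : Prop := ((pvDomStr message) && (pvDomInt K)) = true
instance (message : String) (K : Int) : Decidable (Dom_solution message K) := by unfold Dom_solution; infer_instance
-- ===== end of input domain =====

-- B replaces A's char-by-char accumulator loop (res/temp/cnt with a break) by direct
-- slicing: take the K-character prefix and trim back to the last space if it cuts a word
-- (objective: simpler; same asymptotic cost).

-- ===== PORT A =====
-- the for-loop over range(len(message)) with state (res, temp, cnt) and a `break`;
-- fuel counts the remaining iterations of the range; `cs.getD i ' '` is message[i],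
-- always in range here, so getD is exact.
def solLoopA (cs : List Char) (K : Int) : Nat → Nat → List Char → List Char → Int → List Char
  | 0, _, res, _, _ => res
  | fuel+1, i, res, temp, cnt =>
    let cnt' := cnt + 1
    let temp' := temp ++ [cs.getD i ' ']
    if cnt' ≤ K then
      if i = cs.length - 1 ∨ cs.getD (i+1) ' ' = ' ' then
        solLoopA cs K fuel (i+1) (res ++ temp') [] cnt'
      else
        solLoopA cs K fuel (i+1) res temp' cnt'
    else res

def solution (message : String) (K : Int) : String :=
  String.ofList (solLoopA message.toList K message.toList.length 0 [] [] 0)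

-- ===== PORT B =====
-- hand port of s.rfind(' '): highest index of ' ' in s, -1 if absent (exact for a
-- one-character needle).
def rfindSpace : List Char → Int
  | [] => -1
  | c :: t =>
    let r := rfindSpace t
    if r ≠ -1 then r + 1 else if c = ' ' then 0 else -1

def solution_alt (message : String) (K : Int) : String :=
  let cs := message.toList
  let k := max K 0
  let s := cs.take k.toNat        -- message[:k], exact since k ≥ 0
  if (cs.length : Int) > k ∧ cs.getD k.toNat ' ' ≠ ' ' then   -- message[k], in range here
    let idx := rfindSpace s
    String.ofList (if idx ≠ -1 then s.take idx.toNat else [])     -- s[:idx], exact since idx ≥ 0 there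
  else String.ofList s

-- ===== PRECONDITION & SPEC =====
def Spec_solution (message : String) (K : Int) (out : String) : Prop := out = solution_alt message K
instance (message : String) (K : Int) (out : String) : Decidable (Spec_solution message K out) := by unfold Spec_solution; infer_instance

-- ===== CLAIM (what is proved, stated in full; the proofs are below) =====
def Claim_equal_solution : Prop := ∀ (message : String) (K : Int), Dom_solution message K → Spec_solution message K (solution message K)

-- ===== LEMMAS AND PROOFS =====

-- index of the last flush A performs, computed with the same fuel/branching as the loop
def fres (cs : List Char) (cap : Nat) : Nat → Nat → Nat → Nat
  | 0, _, r => r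
  | fuel+1, i, r =>
    if i < cap then
      if i = cs.length - 1 ∨ cs.getD (i+1) ' ' = ' ' then fres cs cap fuel (i+1) (i+1)
      else fres cs cap fuel (i+1) r
    else r

lemma fres_at_cap (cs : List Char) (cap : Nat) (fuel r : Nat) :
    fres cs cap fuel cap r = r := by
  cases fuel <;> simp [fres]

-- A's loop returns the prefix of the message up to the last flush index
lemma loop_eq_fres (cs : List Char) (K : Int) :
    ∀ (fuel i r : Nat), fuel = cs.length - i → r ≤ i → i ≤ cs.length →
      solLoopA cs K fuel i (cs.take r) ((cs.take i).drop r) (i : Int)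
        = cs.take (fres cs (min K.toNat cs.length) fuel i r) := by
  intro fuel
  induction fuel with
  | zero => intro i r _ _ _; simp [solLoopA, fres]
  | succ fuel ih =>
    intro i r hfuel hri hin
    have hi : i < cs.length := by omega
    have hcnt : ((i : Int) + 1 ≤ K) ↔ (i < min K.toNat cs.length) := by omega
    have htemp : (cs.take i).drop r ++ [cs.getD i ' '] = (cs.take (i+1)).drop r := by
      have h1 : cs.take (i+1) = cs.take i ++ [cs[i]] := by
        rw [List.take_add_one, List.getElem?_eq_getElem hi, Option.toList_some]
      rw [h1, List.drop_append_of_le_length (by simp; omega),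
          List.getD_eq_getElem cs ' ' hi]
    simp only [solLoopA, fres]
    by_cases hK : (i : Int) + 1 ≤ K
    · rw [if_pos hK, if_pos (hcnt.mp hK)]
      by_cases hb : i = cs.length - 1 ∨ cs.getD (i+1) ' ' = ' '
      · rw [if_pos hb, if_pos hb]
        have hres : cs.take r ++ ((cs.take i).drop r ++ [cs.getD i ' ']) = cs.take (i+1) := by
          rw [htemp]
          have h2 : cs.take r = (cs.take (i+1)).take r := by
            rw [List.take_take]; congr 1; omega
          rw [h2, List.take_append_drop]
        rw [hres]
        have h0 : (cs.take (i+1)).drop (i+1) = ([] : List Char) := by simp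
        have := ih (i+1) (i+1) (by omega) (by omega) (by omega)
        rw [h0] at this
        have hc : ((i+1 : Nat) : Int) = (i : Int) + 1 := by push_cast; ring
        rw [hc] at this
        exact this
      · rw [if_neg hb, if_neg hb, htemp]
        have := ih (i+1) r (by omega) (by omega) (by omega)
        have hc : ((i+1 : Nat) : Int) = (i : Int) + 1 := by push_cast; ring
        rw [hc] at this
        exact this
    · rw [if_neg hK, if_neg (by omega : ¬ i < min K.toNat cs.length)]

-- Case len ≤ K: every boundary flushes, the final flush covers the whole string
lemma fres_full (cs : List Char) :
    ∀ (fuel i r : Nat), fuel = cs.length - i → i < cs.length →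
      fres cs cs.length fuel i r = cs.length := by
  intro fuel
  induction fuel with
  | zero => intro i r h hi; omega
  | succ fuel ih =>
    intro i r h hi
    simp only [fres, if_pos hi]
    by_cases hb : i = cs.length - 1 ∨ cs.getD (i+1) ' ' = ' '
    · rw [if_pos hb]
      by_cases hlast : i + 1 = cs.length
      · rw [hlast, fres_at_cap]
      · exact ih (i+1) (i+1) (by omega) (by omega)
    · rw [if_neg hb]
      have hlast : i + 1 ≠ cs.length := fun hc => hb (Or.inl (by omega))
      exact ih (i+1) r (by omega) (by omega)

-- Case K < len and message[K] = ' ': the last flush is exactly at K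
lemma fres_space (cs : List Char) (kc : Nat) (hk : kc < cs.length)
    (hsp : cs.getD kc ' ' = ' ') :
    ∀ (fuel i r : Nat), fuel = cs.length - i → i < kc →
      fres cs kc fuel i r = kc := by
  intro fuel
  induction fuel with
  | zero => intro i r h hi; omega
  | succ fuel ih =>
    intro i r h hi
    simp only [fres, if_pos hi]
    by_cases hik : i + 1 = kc
    · rw [if_pos (Or.inr (hik ▸ hsp)), hik, fres_at_cap]
    · by_cases hb : i = cs.length - 1 ∨ cs.getD (i+1) ' ' = ' '
      · rw [if_pos hb]
        exact ih (i+1) (i+1) (by omega) (by omega)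
      · rw [if_neg hb]
        exact ih (i+1) r (by omega) (by omega)

lemma rfindSpace_ge (l : List Char) : -1 ≤ rfindSpace l := by
  induction l with
  | nil => simp [rfindSpace]
  | cons c t ih => simp only [rfindSpace]; split_ifs <;> omega

lemma rfindSpace_lt (l : List Char) : rfindSpace l < (l.length : Int) := by
  induction l with
  | nil => simp [rfindSpace]
  | cons c t ih =>
    have := rfindSpace_ge t
    simp only [rfindSpace]; split_ifs <;> simp <;> omega

-- Case K < len and message[K] ≠ ' ': the last flush is at the last space before K
lemma fres_rfind (cs : List Char) (kc : Nat) (hk : kc < cs.length)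
    (hsp : cs.getD kc ' ' ≠ ' ') :
    ∀ (fuel i r : Nat), fuel = cs.length - i → i ≤ kc →
      fres cs kc fuel i r =
        (if rfindSpace ((cs.take kc).drop (i+1)) = -1 then r
         else (rfindSpace ((cs.take kc).drop (i+1))).toNat + (i+1)) := by
  intro fuel
  induction fuel with
  | zero => intro i r h hi; omega
  | succ fuel ih =>
    intro i r h hi
    have hlen : (cs.take kc).length = kc := by simp; omega
    by_cases hcap : i < kc
    · simp only [fres, if_pos hcap]
      have hnotlast : i ≠ cs.length - 1 := by omega
      by_cases hik : i + 1 = kc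
      · have hb : ¬ (i = cs.length - 1 ∨ cs.getD (i+1) ' ' = ' ') := by
          rintro (h1 | h2)
          · exact hnotlast h1
          · exact hsp (by rwa [hik] at h2)
        rw [if_neg hb, ih (i+1) r (by omega) (by omega)]
        have hd1 : (cs.take kc).drop (i+1) = [] := List.drop_eq_nil_of_le (by omega)
        have hd2 : (cs.take kc).drop (i+1+1) = [] := List.drop_eq_nil_of_le (by omega)
        rw [hd1, hd2]
        simp [rfindSpace]
      · have hik' : i + 1 < kc := by omega
        have hdrop : (cs.take kc).drop (i+1) = cs.getD (i+1) ' ' :: (cs.take kc).drop (i+2) := by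
          rw [List.drop_eq_getElem_cons (by omega : i+1 < (cs.take kc).length)]
          congr 1
          rw [List.getElem_take, List.getD_eq_getElem cs ' ' (by omega)]
        have hq := rfindSpace_ge ((cs.take kc).drop (i+2))
        have hrec : rfindSpace ((cs.take kc).drop (i+1)) =
            (if rfindSpace ((cs.take kc).drop (i+2)) ≠ -1 then rfindSpace ((cs.take kc).drop (i+2)) + 1
             else if cs.getD (i+1) ' ' = ' ' then 0 else -1) := by
          rw [hdrop]; simp only [rfindSpace]
        by_cases hb : i = cs.length - 1 ∨ cs.getD (i+1) ' ' = ' '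
        · have hspc : cs.getD (i+1) ' ' = ' ' := hb.resolve_left hnotlast
          rw [if_pos hb, ih (i+1) (i+1) (by omega) (by omega), hrec, if_pos hspc]
          simp only [show i+1+1 = i+2 from rfl]
          by_cases hq2 : rfindSpace ((cs.take kc).drop (i+2)) = -1
          · rw [if_pos hq2, if_neg (not_not_intro hq2), if_neg (by omega : ¬ ((0:Int) = -1))]
            omega
          · rw [if_neg hq2, if_pos hq2,
                if_neg (by omega : ¬ (rfindSpace ((cs.take kc).drop (i+2)) + 1 = -1))]
            omega
        · have hspc : cs.getD (i+1) ' ' ≠ ' ' := fun hc => hb (Or.inr hc)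
          rw [if_neg hb, ih (i+1) r (by omega) (by omega), hrec, if_neg hspc]
          simp only [show i+1+1 = i+2 from rfl]
          by_cases hq2 : rfindSpace ((cs.take kc).drop (i+2)) = -1
          · rw [if_pos hq2, if_neg (not_not_intro hq2), if_pos (rfl : (-1:Int) = -1)]
          · rw [if_neg hq2, if_pos hq2,
                if_neg (by omega : ¬ (rfindSpace ((cs.take kc).drop (i+2)) + 1 = -1))]
            omega
    · have hieq : i = kc := by omega
      subst hieq
      rw [fres_at_cap]
      have hnil : (cs.take i).drop (i+1) = [] := List.drop_eq_nil_of_le (by omega)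
      rw [hnil]
      simp [rfindSpace]

lemma maxtoNat (K : Int) : (max K 0).toNat = K.toNat := by omega

-- ===== VERDICT (by name: the statement is the Claim_ definition above) =====
theorem solution_spec : Claim_equal_solution := by
  intro message K _
  unfold Spec_solution
  simp only [solution, solution_alt, maxtoNat]
  generalize message.toList = cs
  have hloop := loop_eq_fres cs K cs.length 0 0 (by omega) (by omega) (by omega)
  simp only [List.take_zero, List.drop_nil, Nat.cast_zero] at hloop
  rw [hloop]
  by_cases hbig : (cs.length : Int) > max K 0
  · have hklt : K.toNat < cs.length := by omega
    have hmin : min K.toNat cs.length = K.toNat := by omega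
    rw [hmin]
    by_cases hspc : cs.getD K.toNat ' ' = ' '
    · rw [if_neg (fun hcond => hcond.2 hspc)]
      rcases Nat.eq_zero_or_pos K.toNat with h0 | hpos
      · rw [h0, fres_at_cap]
      · rw [fres_space cs K.toNat hklt hspc cs.length 0 0 (by omega) hpos]
    · rw [if_pos ⟨hbig, hspc⟩]
      rw [fres_rfind cs K.toNat hklt hspc cs.length 0 0 (by omega) (by omega)]
      rcases Nat.eq_zero_or_pos K.toNat with h0 | hpos
      · rw [h0]
        simp [rfindSpace]
      · have hlen : (cs.take K.toNat).length = K.toNat := by simp; omega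
        have hcons : cs.take K.toNat = (cs.take K.toNat)[0]'(by omega) :: (cs.take K.toNat).drop 1 := by
          have h := List.drop_eq_getElem_cons (by omega : 0 < (cs.take K.toNat).length)
          rwa [List.drop_zero] at h
        have hq := rfindSpace_ge ((cs.take K.toNat).drop 1)
        have hqlt := rfindSpace_lt ((cs.take K.toNat).drop 1)
        have hqlen : ((cs.take K.toNat).drop 1).length = K.toNat - 1 := by simp [hlen]
        rw [hqlen] at hqlt
        have hrec : rfindSpace (cs.take K.toNat) =
            (if rfindSpace ((cs.take K.toNat).drop 1) ≠ -1 then rfindSpace ((cs.take K.toNat).drop 1) + 1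
             else if (cs.take K.toNat)[0]'(by omega) = ' ' then 0 else -1) := by
          conv_lhs => rw [hcons]
          simp only [rfindSpace]
        simp only [show (0:Nat)+1 = 1 from rfl]
        by_cases hq2 : rfindSpace ((cs.take K.toNat).drop 1) = -1
        · rw [if_pos hq2, if_neg (not_not_intro hq2)] at *
          by_cases hh : (cs.take K.toNat)[0]'(by omega) = ' '
          · rw [if_pos hh] at hrec
            rw [hrec, if_pos (by omega : (0:Int) ≠ -1)]
            simp
          · rw [if_neg hh] at hrec
            rw [hrec, if_neg (not_not_intro (rfl : (-1:Int) = -1))]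
            simp
        · rw [if_neg hq2]
          rw [if_pos hq2] at hrec
          rw [hrec, if_pos (by omega : rfindSpace ((cs.take K.toNat).drop 1) + 1 ≠ -1),
              List.take_take]
          congr 2
          omega
  · rw [if_neg (fun h => hbig h.1)]
    have hle : cs.length ≤ K.toNat := by omega
    have hmin : min K.toNat cs.length = cs.length := by omega
    rw [hmin, List.take_of_length_le hle]
    rcases Nat.eq_zero_or_pos cs.length with h0 | hpos
    · have hnil : cs = [] := List.length_eq_zero_iff.mp h0
      subst hnil
      simp [fres]
    · rw [fres_full cs cs.length 0 0 (by omega) hpos, List.take_length]
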